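-- pv_equiv track=rewrite | github.com/stefanoconiglio/ramsey | the-hunt-for-facets/jump-space_v1/generate_circulant_tex.py | adjacency_masks_from_jumps
-- ===== SOURCE A (Python) =====
-- def adjacency_masks_from_jumps(t: int, jumps: set[int]) -> list[int]:
--     masks = [0 for _ in range(t)]
--     for vertex in range(t):
--         mask = 0
--         for jump in jumps:
--             plus = (vertex + jump) % t
--             minus = (vertex - jump) % t
--             if plus != vertex:
--                 mask |= 1 << plus
--             if minus != vertex:
--                 mask |= 1 << minus
--         masks[vertex] = mask
--     return masks
-- ===== SOURCE B (Python) =====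
-- def adjacency_masks_from_jumps(t: int, jumps: set[int]) -> list[int]:
--     if t <= 0:
--         return []
--     offs = []
--     for j in jumps:
--         d = j % t
--         if d != 0:
--             if d not in offs:
--                 offs.append(d)
--             if (t - d) not in offs:
--                 offs.append(t - d)
--     out = []
--     for v in range(t):
--         m = 0
--         for d in offs:
--             m |= 1 << ((v + d) % t)
--         out.append(m)
--     return out
-- ===== Notes on version B (the rewrite author's own statement) =====
-- stated objective: alternative
-- what changed: B precomputes the set of distinct nonzero offsets {j%t, t-j%t} from the jump set once, then builds each vertex's mask with a single (v+d)%t pass over those offsets, instead of A's per-vertex recomputation of both (v+j)%t and (v-j)%t for every jump.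
import Mathlib
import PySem

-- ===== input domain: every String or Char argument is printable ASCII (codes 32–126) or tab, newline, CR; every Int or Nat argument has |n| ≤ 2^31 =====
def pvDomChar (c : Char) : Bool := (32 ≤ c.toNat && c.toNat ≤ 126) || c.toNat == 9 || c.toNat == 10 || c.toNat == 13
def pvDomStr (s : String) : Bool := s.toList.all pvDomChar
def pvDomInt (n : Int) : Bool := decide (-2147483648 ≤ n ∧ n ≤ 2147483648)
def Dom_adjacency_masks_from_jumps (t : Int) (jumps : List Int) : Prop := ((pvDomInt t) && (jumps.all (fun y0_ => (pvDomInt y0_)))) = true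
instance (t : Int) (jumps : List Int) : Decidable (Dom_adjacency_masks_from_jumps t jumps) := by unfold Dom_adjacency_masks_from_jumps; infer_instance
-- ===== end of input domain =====

-- B precomputes the distinct nonzero jump offsets {j%t, t-j%t} once and builds each vertex mask
-- from those offsets only (alternative decomposition; same asymptotic cost, no per-vertex minus pass).

-- ===== PORT A =====
-- Shifts: both exponents are Python `% t` results with t ≥ 1 (the loop body only runs then), hence
-- nonnegative, so `.toNat` is exact.  `masks[vertex] = mask` is PySem.List.pySetD (vertex ∈ range(t)).
def adjacency_masks_from_jumps (t : Int) (jumps : List Int) : List Int :=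
  let masks := (PySem.List.pyRange 0 t 1).map (fun _ => (0 : Int))
  (PySem.List.pyRange 0 t 1).foldl
    (fun masks vertex =>
      let mask := jumps.foldl
        (fun mask jump =>
          let plus := PySem.Int.mod (vertex + jump) t
          let minus := PySem.Int.mod (vertex - jump) t
          let mask := if plus ≠ vertex then PySem.Int.bor mask ((1 : Int) <<< plus.toNat) else mask
          if minus ≠ vertex then PySem.Int.bor mask ((1 : Int) <<< minus.toNat) else mask)
        0
      PySem.List.pySetD masks vertex mask)
    masks

-- ===== PORT B =====
def adjacency_masks_from_jumps_alt (t : Int) (jumps : List Int) : List Int :=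
  if t ≤ 0 then []
  else
    let offs := jumps.foldl
      (fun offs j =>
        let d := PySem.Int.mod j t
        if d ≠ 0 then PySem.Set.add (PySem.Set.add offs d) (t - d) else offs)
      PySem.Set.empty
    (PySem.List.pyRange 0 t 1).map
      (fun v => offs.foldl
        (fun m d => PySem.Int.bor m ((1 : Int) <<< (PySem.Int.mod (v + d) t).toNat)) 0)

-- ===== PRECONDITION & SPEC =====
def Spec_adjacency_masks_from_jumps (t : Int) (jumps : List Int) (out : List Int) : Prop := out = adjacency_masks_from_jumps_alt t jumps
instance (t : Int) (jumps : List Int) (out : List Int) : Decidable (Spec_adjacency_masks_from_jumps t jumps out) := by unfold Spec_adjacency_masks_from_jumps; infer_instance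

-- ===== CLAIM (what is proved, stated in full; the proofs are below) =====
def Claim_equal_adjacency_masks_from_jumps : Prop := ∀ (t : Int) (jumps : List Int), Dom_adjacency_masks_from_jumps t jumps → Spec_adjacency_masks_from_jumps t jumps (adjacency_masks_from_jumps t jumps)

-- ===== LEMMAS AND PROOFS =====

-- fold of bitwise-or over a list of Nats, from 0
def pvOr (l : List Nat) : Nat := l.foldl (· ||| ·) 0

theorem pvOr_foldl (l : List Nat) : ∀ a : Nat, l.foldl (· ||| ·) a = a ||| pvOr l := by
  induction l with
  | nil => intro a; simp [pvOr]
  | cons b l ih =>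
    intro a
    have h0 : pvOr (b :: l) = b ||| pvOr l := by
      simpa [pvOr] using ih b
    simp only [List.foldl_cons, ih, h0, Nat.lor_assoc]

theorem pv_mem_or {x : Nat} {l : List Nat} (h : x ∈ l) : x ||| pvOr l = pvOr l := by
  induction l with
  | nil => simp at h
  | cons b l ih =>
    have h0 : pvOr (b :: l) = b ||| pvOr l := by
      simpa [pvOr] using pvOr_foldl l b
    rcases List.mem_cons.mp h with rfl | hx
    · rw [h0, ← Nat.lor_assoc]
      simp
    · rw [h0, ← Nat.lor_assoc, Nat.lor_comm x b, Nat.lor_assoc, ih hx]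

theorem pv_subset_or {l1 l2 : List Nat} (h : ∀ x ∈ l1, x ∈ l2) :
    pvOr l1 ||| pvOr l2 = pvOr l2 := by
  induction l1 with
  | nil => simp [pvOr]
  | cons b l ih =>
    have h0 : pvOr (b :: l) = b ||| pvOr l := by
      simpa [pvOr] using pvOr_foldl l b
    rw [h0, Nat.lor_assoc, ih (fun x hx => h x (List.mem_cons_of_mem b hx)),
        pv_mem_or (h b (List.mem_cons_self ..))]

theorem pv_seteq_or {l1 l2 : List Nat} (h : ∀ x, x ∈ l1 ↔ x ∈ l2) : pvOr l1 = pvOr l2 := by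
  have h1 := pv_subset_or (fun x hx => (h x).mp hx)
  have h2 := pv_subset_or (fun x hx => (h x).mpr hx)
  rw [← h1, Nat.lor_comm, h2]

theorem pv_shift (k : Nat) : (1 : Int) <<< k = ((2 ^ k : Nat) : Int) := by
  rw [Int.shiftLeft_eq]; push_cast; ring

theorem pv_bor_cast (m n : Nat) : PySem.Int.bor (m : Int) (n : Int) = ((m ||| n : Nat) : Int) := by
  simp [PySem.Int.bor]

-- the (ghost) list of mask bits contributed by one jump at one vertex, as Nats, using emod
def pvAbits (t v j : Int) : List Nat :=
  (if (v + j) % t ≠ v then [2 ^ ((v + j) % t).toNat] else []) ++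
  (if (v - j) % t ≠ v then [2 ^ ((v - j) % t).toNat] else [])

theorem pvInnerA (t v : Int) (ht : 0 < t) (jumps : List Int) : ∀ m : Nat,
    jumps.foldl
      (fun mask jump =>
        let plus := PySem.Int.mod (v + jump) t
        let minus := PySem.Int.mod (v - jump) t
        let mask := if plus ≠ v then PySem.Int.bor mask ((1 : Int) <<< plus.toNat) else mask
        if minus ≠ v then PySem.Int.bor mask ((1 : Int) <<< minus.toNat) else mask)
      (m : Int)
    = (((jumps.flatMap (pvAbits t v)).foldl (· ||| ·) m : Nat) : Int) := by
  simp only [PySem.Int.mod_eq_emod_of_pos ht, pv_shift]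
  induction jumps with
  | nil => intro m; rfl
  | cons j l ih =>
    intro m
    simp only [List.foldl_cons, List.flatMap_cons, pvAbits]
    split_ifs with h1 h2 h2 <;>
      simp only [List.foldl_append, List.foldl_cons, List.foldl_nil, pv_bor_cast] <;>
      exact ih _

theorem pvInnerB (t v : Int) (ht : 0 < t) (offs : List Int) : ∀ m : Nat,
    offs.foldl
      (fun m d => PySem.Int.bor m ((1 : Int) <<< (PySem.Int.mod (v + d) t).toNat)) (m : Int)
    = (((offs.map (fun d => 2 ^ ((v + d) % t).toNat)).foldl (· ||| ·) m : Nat) : Int) := by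
  simp only [PySem.Int.mod_eq_emod_of_pos ht, pv_shift]
  induction offs with
  | nil => intro m; rfl
  | cons d l ih =>
    intro m
    simp only [List.foldl_cons, List.map_cons, pv_bor_cast]
    exact ih _

theorem pvOffsMem (t : Int) (ht : 0 < t) (jumps : List Int) (x : Int) : ∀ s : PySem.Set Int,
    (x ∈ jumps.foldl
        (fun offs j =>
          let d := PySem.Int.mod j t
          if d ≠ 0 then PySem.Set.add (PySem.Set.add offs d) (t - d) else offs) s
      ↔ x ∈ s ∨ ∃ j ∈ jumps, j % t ≠ 0 ∧ (x = j % t ∨ x = t - j % t)) := by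
  simp only [PySem.Int.mod_eq_emod_of_pos ht]
  induction jumps with
  | nil => intro s; simp
  | cons j l ih =>
    intro s
    simp only [List.foldl_cons]
    rw [ih]
    by_cases hj : j % t = 0
    · rw [if_neg (not_not_intro hj)]
      constructor
      · rintro (hs | ⟨j', hj', h⟩)
        · exact Or.inl hs
        · exact Or.inr ⟨j', List.mem_cons_of_mem j hj', h⟩
      · rintro (hs | ⟨j', hj', h⟩)
        · exact Or.inl hs
        · rcases List.mem_cons.mp hj' with rfl | hj''
          · exact absurd hj h.1
          · exact Or.inr ⟨j', hj'', h⟩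
    · rw [if_pos hj]
      constructor
      · rintro (hs | ⟨j', hj', h⟩)
        · rcases (PySem.Set.mem_add _ _ _).mp hs with hs2 | rfl
          · rcases (PySem.Set.mem_add _ _ _).mp hs2 with hs3 | rfl
            · exact Or.inl hs3
            · exact Or.inr ⟨j, List.mem_cons_self .., hj, Or.inl rfl⟩
          · exact Or.inr ⟨j, List.mem_cons_self .., hj, Or.inr rfl⟩
        · exact Or.inr ⟨j', List.mem_cons_of_mem j hj', h⟩
      · rintro (hs | ⟨j', hj', h⟩)
        · exact Or.inl ((PySem.Set.mem_add _ _ _).mpr (Or.inl ((PySem.Set.mem_add _ _ _).mpr (Or.inl hs))))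
        · rcases List.mem_cons.mp hj' with rfl | hj''
          · rcases h.2 with rfl | rfl
            · exact Or.inl ((PySem.Set.mem_add _ _ _).mpr (Or.inl ((PySem.Set.mem_add _ _ _).mpr (Or.inr rfl))))
            · exact Or.inl ((PySem.Set.mem_add _ _ _).mpr (Or.inr rfl))
          · exact Or.inr ⟨j', hj'', h⟩

-- modular arithmetic helpers (emod, positive modulus)
theorem pvModAdd (t v j : Int) : (v + j) % t = (v + j % t) % t := by
  conv_lhs => rw [Int.add_emod]
  conv_rhs => rw [Int.add_emod, Int.emod_emod_of_dvd _ dvd_rfl]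

theorem pvModSub (t v j : Int) : (v - j) % t = (v + (t - j % t)) % t := by
  rw [show v + (t - j % t) = v - j % t + t * 1 by ring, Int.add_mul_emod_self_left,
      Int.sub_emod v j t, Int.sub_emod v (j % t) t, Int.emod_emod_of_dvd _ dvd_rfl]

theorem pvAddSelf {t v d : Int} (_ht : 0 < t) (hv0 : 0 ≤ v) (hvt : v < t)
    (hd0 : 0 ≤ d) (hdt : d < t) : (v + d) % t = v ↔ d = 0 := by
  constructor
  · intro h
    by_cases hc : v + d < t
    · have := Int.emod_eq_of_lt (by omega) hc
      omega
    · have h2 : (v + d) % t = v + d - t := by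
        have : (v + d - t) % t = (v + d) % t := by
          conv_rhs => rw [show v + d = v + d - t + t * 1 by ring, Int.add_mul_emod_self_left]
        rw [← this, Int.emod_eq_of_lt (by omega) (by omega)]
      omega
  · rintro rfl
    rw [add_zero, Int.emod_eq_of_lt hv0 hvt]

-- the per-vertex bit multisets of A and of B have the same members
theorem pvBitsEq (t v : Int) (ht : 0 < t) (hv0 : 0 ≤ v) (hvt : v < t) (jumps : List Int)
    (x : Nat) :
    x ∈ jumps.flatMap (pvAbits t v) ↔
      x ∈ (jumps.foldl
            (fun offs j =>
              let d := PySem.Int.mod j t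
              if d ≠ 0 then PySem.Set.add (PySem.Set.add offs d) (t - d) else offs)
            PySem.Set.empty).map (fun d => 2 ^ ((v + d) % t).toNat) := by
  have htne : t ≠ 0 := by omega
  rw [List.mem_map]
  constructor
  · rw [List.mem_flatMap]
    rintro ⟨j, hj, hx⟩
    have hne : j % t ≠ 0 := by
      intro h0
      have e1 : (v + j) % t = v := by
        rw [pvModAdd t v j, h0, add_zero, Int.emod_eq_of_lt hv0 hvt]
      have e2 : (v - j) % t = v := by
        rw [pvModSub t v j, h0, sub_zero, show v + t = v + t * 1 by ring,
            Int.add_mul_emod_self_left, Int.emod_eq_of_lt hv0 hvt]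
      simp [pvAbits, e1, e2] at hx
    simp only [pvAbits, pvModAdd t v j, pvModSub t v j, List.mem_append,
      List.mem_ite_nil_right, List.mem_singleton] at hx
    rcases hx with ⟨_, rfl⟩ | ⟨_, rfl⟩
    · refine ⟨j % t, ?_, rfl⟩
      rw [pvOffsMem t ht jumps (j % t) PySem.Set.empty]
      exact Or.inr ⟨j, hj, hne, Or.inl rfl⟩
    · refine ⟨t - j % t, ?_, rfl⟩
      rw [pvOffsMem t ht jumps (t - j % t) PySem.Set.empty]
      exact Or.inr ⟨j, hj, hne, Or.inr rfl⟩
  · rintro ⟨d, hd, rfl⟩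
    have hd' := (pvOffsMem t ht jumps d PySem.Set.empty).mp hd
    rcases hd' with h | ⟨j, hj, hne, rfl | rfl⟩
    · simp [PySem.Set.empty] at h
    all_goals {
      have hd0 : 0 ≤ j % t := Int.emod_nonneg j htne
      have hdt : j % t < t := Int.emod_lt_of_pos j ht
      have hplus : (v + j) % t ≠ v := fun h =>
        hne ((pvAddSelf ht hv0 hvt hd0 hdt).mp (by rwa [pvModAdd t v j] at h))
      have hminus : (v - j) % t ≠ v := fun h => by
        have h2 := (pvAddSelf ht hv0 hvt (d := t - j % t) (by omega) (by omega)).mp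
          (by rwa [pvModSub t v j] at h)
        omega
      rw [List.mem_flatMap]
      refine ⟨j, hj, ?_⟩
      simp only [pvAbits, List.mem_append, List.mem_ite_nil_right, List.mem_singleton]
      first
      | exact Or.inl ⟨hplus, by rw [← pvModAdd t v j]⟩
      | exact Or.inr ⟨hminus, by rw [← pvModSub t v j]⟩
    }

theorem pvTakeSet (x : Int) : ∀ (ms : List Int) (k : Nat), k < ms.length →
    (ms.set k x).take (k + 1) = ms.take k ++ [x] := by
  intro ms
  induction ms with
  | nil => intro k h; simp at h
  | cons y ys ih =>
    intro k h
    cases k with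
    | zero => simp
    | succ k =>
      simp only [List.set_cons_succ, List.take_succ_cons, List.cons_append]
      rw [ih k (by simpa using h)]

theorem pvOuter (t : Int) (g : Int → Int) : ∀ (n : Nat) (a : Int) (ms : List Int), 0 ≤ a →
    a ≤ t → (ms.length : Int) = t → (t - a).toNat = n →
    (PySem.List.pyRange a t 1).foldl (fun masks v => PySem.List.pySetD masks v (g v)) ms
      = ms.take a.toNat ++ (PySem.List.pyRange a t 1).map g := by
  intro n
  induction n with
  | zero =>
    intro a ms ha hat hlen hn
    have hta : t ≤ a := by omega
    rw [PySem.List.pyRange_one_eq_nil hta]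
    simp only [List.foldl_nil, List.map_nil, List.append_nil]
    rw [List.take_of_length_le (by omega)]
  | succ n ih =>
    intro a ms ha hat hlen hn
    have halt : a < t := by omega
    rw [PySem.List.pyRange_one_cons halt]
    simp only [List.foldl_cons, List.map_cons]
    rw [PySem.List.pySetD_of_nonneg ms (g a) ha,
        ih (a + 1) (ms.set a.toNat (g a)) (by omega) (by omega) (by simpa using hlen) (by omega)]
    rw [show (a + 1).toNat = a.toNat + 1 by omega,
        pvTakeSet (g a) ms a.toNat (by omega)]
    simp

-- ===== VERDICT (by name: the statement is the Claim_ definition above) =====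
theorem adjacency_masks_from_jumps_spec : Claim_equal_adjacency_masks_from_jumps := by
  intro t jumps _
  unfold Spec_adjacency_masks_from_jumps adjacency_masks_from_jumps adjacency_masks_from_jumps_alt
  by_cases hle : t ≤ 0
  · rw [PySem.List.pyRange_one_eq_nil (by omega)]
    simp [hle]
  · have ht : 0 < t := by omega
    rw [if_neg (by omega)]
    have hlen : (((PySem.List.pyRange 0 t 1).map (fun _ => (0 : Int))).length : Int) = t := by
      simp [PySem.List.length_pyRange_one]
      omega
    rw [pvOuter t _ (t - 0).toNat 0 _ le_rfl (by omega) hlen rfl]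
    simp only [Int.toNat_zero, List.take_zero, List.nil_append]
    apply List.map_congr_left
    intro v hv
    rw [PySem.List.mem_pyRange_one] at hv
    have hA := pvInnerA t v ht jumps 0
    have hB := pvInnerB t v ht (jumps.foldl
      (fun offs j =>
        let d := PySem.Int.mod j t
        if d ≠ 0 then PySem.Set.add (PySem.Set.add offs d) (t - d) else offs)
      PySem.Set.empty) 0
    simp only [Int.natCast_zero] at hA hB
    rw [hA, hB]
    congr 1
    exact pv_seteq_or (fun x => pvBitsEq t v ht hv.1 hv.2 jumps x)
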